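-- pv_equiv track=rewrite | github.com/fonzi22/DataMining | algorithms/PrefixSpan.py | _project_database
-- ===== SOURCE A (Python) =====
-- def _project_database(sequences, prefix):
--     """Tạo projected database cho một prefix"""
--     projected = []
--     for sequence in sequences:
--         # Tìm vị trí của prefix trong sequence
--         i = 0
--         for item in prefix:
--             found = False
--             while i < len(sequence):
--                 if item in sequence[i]:
--                     found = True
--                     i += 1
--                     break
--                 i += 1
--             if not found:
--                 break
--         else:
--             # Nếu tìm thấy prefix, thêm phần còn lại vào projected database
--             if i < len(sequence):
--                 projected.append(sequence[i:])
--     return projected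
-- ===== SOURCE B (Python) =====
-- def _bisect_left(ps, x):
--     """Index of the first element of ascending list ps that is >= x."""
--     lo, hi = 0, len(ps)
--     while lo < hi:
--         mid = (lo + hi) // 2
--         if ps[mid] < x:
--             lo = mid + 1
--         else:
--             hi = mid
--     return lo
--
--
-- def _project_database(sequences, prefix):
--     """Inverted positional index per sequence + binary search per prefix item."""
--     projected = []
--     for sequence in sequences:
--         # item -> strictly increasing list of itemset positions containing it
--         pos = {}
--         for idx, itemset in enumerate(sequence):
--             for item in itemset:
--                 ps = pos.setdefault(item, [])
--                 if not ps or ps[-1] != idx: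
--                     ps.append(idx)
--         nxt = 0
--         ok = True
--         for item in prefix:
--             ps = pos.get(item, [])
--             if not ps or ps[-1] < nxt:
--                 ok = False
--                 break
--             nxt = ps[_bisect_left(ps, nxt)] + 1
--         if ok and nxt < len(sequence):
--             projected.append(sequence[nxt:])
--     return projected
-- ===== Notes on version B (the rewrite author's own statement) =====
-- stated objective: alternative
-- what changed: B builds a per-sequence inverted positional index (dict item -> increasing position list) and matches each prefix item by binary search in that index, instead of A's nested prefix-loop with an inner linear while-scan over the sequence.
import Mathlib
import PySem

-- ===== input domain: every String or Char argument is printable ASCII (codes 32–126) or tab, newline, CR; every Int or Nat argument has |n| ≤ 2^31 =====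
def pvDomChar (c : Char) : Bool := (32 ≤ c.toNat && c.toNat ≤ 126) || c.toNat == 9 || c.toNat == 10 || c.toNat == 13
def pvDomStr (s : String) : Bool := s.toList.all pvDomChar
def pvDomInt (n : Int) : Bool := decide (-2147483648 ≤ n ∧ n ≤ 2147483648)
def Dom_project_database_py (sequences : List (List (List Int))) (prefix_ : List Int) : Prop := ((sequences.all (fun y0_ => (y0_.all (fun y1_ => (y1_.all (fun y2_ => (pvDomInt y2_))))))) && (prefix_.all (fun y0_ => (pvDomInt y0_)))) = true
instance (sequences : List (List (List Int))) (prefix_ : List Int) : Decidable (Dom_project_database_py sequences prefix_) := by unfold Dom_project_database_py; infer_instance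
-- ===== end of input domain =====

-- B replaces A's greedy nested scan by a different data structure: per sequence it first
-- builds an inverted positional index (item -> increasing list of itemset positions), then
-- matches each prefix item by hand-written binary search in that index (objective: alternative).

-- ===== PORT A =====
-- inner 'while i < len(sequence): if item in sequence[i] …' of A
def whileA (seq : List (List Int)) (item : Int) (i : Nat) : Option Nat :=
  if h : i < seq.length then
    if item ∈ seq[i] then some (i + 1) else whileA seq item (i + 1)
  else none
termination_by seq.length - i

-- 'for item in prefix: … else: …' of A: some i = loop completed (else branch), none = broke out
def loopA (seq : List (List Int)) (prefix_ : List Int) (i : Nat) : Option Nat :=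
  match prefix_ with
  | [] => some i
  | item :: rest =>
    match whileA seq item i with
    | some j => loopA seq rest j
    | none => none

def stepA (prefix_ : List Int) (acc : List (List (List Int))) (seq : List (List Int)) :
    List (List (List Int)) :=
  match loopA seq prefix_ 0 with
  | some i => if i < seq.length then acc ++ [seq.drop i] else acc
  | none => acc

def project_database_py (sequences : List (List (List Int))) (prefix_ : List Int) :
    List (List (List Int)) :=
  sequences.foldl (stepA prefix_) []

-- ===== PORT B =====
-- 'ps = pos.setdefault(item, []); if not ps or ps[-1] != idx: ps.append(idx)'
-- ('not ps or ps[-1] != idx' is exactly 'ps.getLast? ≠ some idx')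
def addItem (idx : Nat) (d : PySem.Dict Int (List Nat)) (item : Int) :
    PySem.Dict Int (List Nat) :=
  let ps := d.getD item []
  if ps.getLast? ≠ some idx then d.insert item (ps ++ [idx]) else d

-- 'for idx, itemset in enumerate(sequence): for item in itemset: …'
def buildPos (idx : Nat) (d : PySem.Dict Int (List Nat)) :
    List (List Int) → PySem.Dict Int (List Nat)
  | [] => d
  | itemset :: rest => buildPos (idx + 1) (itemset.foldl (addItem idx) d) rest

-- Source B's hand-written _bisect_left loop ('while lo < hi: …'); ps[mid] is in range
-- whenever the callers below reach it, so getD is exact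
def lowerBound (ps : List Nat) (x lo hi : Nat) : Nat :=
  if lo < hi then
    let mid := (lo + hi) / 2
    if ps.getD mid 0 < x then lowerBound ps x (mid + 1) hi else lowerBound ps x lo mid
  else lo
termination_by hi - lo
decreasing_by all_goals omega

-- 'for item in prefix: …' with the ok-flag/break encoded as Option
def matchB (pos : PySem.Dict Int (List Nat)) : List Int → Nat → Option Nat
  | [], nxt => some nxt
  | item :: rest, nxt =>
    let ps := pos.getD item []
    match ps.getLast? with
    | none => none
    | some last =>
      if last < nxt then none
      else matchB pos rest (ps.getD (lowerBound ps nxt 0 ps.length) 0 + 1)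

def stepB (prefix_ : List Int) (acc : List (List (List Int))) (seq : List (List Int)) :
    List (List (List Int)) :=
  match matchB (buildPos 0 PySem.Dict.empty seq) prefix_ 0 with
  | some nxt => if nxt < seq.length then acc ++ [seq.drop nxt] else acc
  | none => acc

def project_database_py_alt (sequences : List (List (List Int))) (prefix_ : List Int) :
    List (List (List Int)) :=
  sequences.foldl (stepB prefix_) []

-- ===== PRECONDITION & SPEC =====
def Spec_project_database_py (sequences : List (List (List Int))) (prefix_ : List Int) (out : List (List (List Int))) : Prop := out = project_database_py_alt sequences prefix_
instance (sequences : List (List (List Int))) (prefix_ : List Int) (out : List (List (List Int))) : Decidable (Spec_project_database_py sequences prefix_ out) := by unfold Spec_project_database_py; infer_instance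

-- ===== CLAIM (what is proved, stated in full; the proofs are below) =====
def Claim_equal_project_database_py : Prop := ∀ (sequences : List (List (List Int))) (prefix_ : List Int), Dom_project_database_py sequences prefix_ → Spec_project_database_py sequences prefix_ (project_database_py sequences prefix_)

-- ===== LEMMAS AND PROOFS =====

-- specification list of the inverted index: positions ≥ idx shifted to start at idx
def idxList : Nat → List (List Int) → Int → List Nat
  | _, [], _ => []
  | idx, s :: rest, item => (if item ∈ s then [idx] else []) ++ idxList (idx + 1) rest item

-- inner itemset loop: appends idx to item's list exactly once if item occurs
theorem foldl_addItem (idx : Nat) :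
    ∀ (itemset : List Int) (d : PySem.Dict Int (List Nat)) (item : Int),
      (itemset.foldl (addItem idx) d).getD item [] =
        if item ∈ itemset ∧ (d.getD item []).getLast? ≠ some idx
        then d.getD item [] ++ [idx] else d.getD item [] := by
  intro itemset
  induction itemset with
  | nil => intro d item; simp
  | cons a rest ih =>
    intro d item
    simp only [List.foldl_cons]
    rw [ih]
    by_cases hea : item = a
    · subst hea
      by_cases hl : (d.getD item []).getLast? = some idx
      · simp [addItem, hl]
      · simp [addItem, hl, PySem.Dict.getD_insert_self]
    · have hgd : (addItem idx d a).getD item [] = d.getD item [] := by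
        unfold addItem
        simp only []
        split
        · rw [PySem.Dict.getD_insert]; simp [hea]
        · rfl
      rw [hgd]
      simp [hea]

-- outer enumerate loop
theorem buildPos_getD :
    ∀ (tail : List (List Int)) (idx : Nat) (d : PySem.Dict Int (List Nat)),
      (∀ it x, x ∈ d.getD it [] → x < idx) →
      ∀ item, (buildPos idx d tail).getD item [] = d.getD item [] ++ idxList idx tail item := by
  intro tail
  induction tail with
  | nil => intro idx d _ item; simp [buildPos, idxList]
  | cons s rest ih =>
    intro idx d hinv item
    have hne : ∀ it : Int, (d.getD it []).getLast? ≠ some idx := by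
      intro it hc
      have hmem : idx ∈ d.getD it [] := List.mem_of_getLast? hc
      exact absurd (hinv it idx hmem) (lt_irrefl idx)
    have hstep : ∀ it : Int, ((s.foldl (addItem idx) d).getD it []) =
        d.getD it [] ++ (if it ∈ s then [idx] else []) := by
      intro it
      rw [foldl_addItem]
      by_cases hm : it ∈ s
      · simp [hm, hne it]
      · simp [hm]
    have hinv' : ∀ it x, x ∈ (s.foldl (addItem idx) d).getD it [] → x < idx + 1 := by
      intro it x hx
      rw [hstep it] at hx
      rcases List.mem_append.mp hx with h | h
      · exact lt_trans (hinv it x h) (Nat.lt_succ_self idx)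
      · split at h
        · simp at h; omega
        · simp at h
    show (buildPos (idx + 1) (s.foldl (addItem idx) d) rest).getD item [] = _
    rw [ih (idx + 1) _ hinv' item, hstep item]
    simp [idxList, List.append_assoc]

theorem buildPos_spec (seq : List (List Int)) (item : Int) :
    (buildPos 0 PySem.Dict.empty seq).getD item [] = idxList 0 seq item := by
  have := buildPos_getD seq 0 PySem.Dict.empty
    (by intro it x hx; simp [PySem.Dict.getD_empty] at hx) item
  simpa [PySem.Dict.getD_empty] using this

theorem mem_idxList :
    ∀ (tail : List (List Int)) (idx : Nat) (item : Int) (j : Nat),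
      j ∈ idxList idx tail item ↔
        ∃ k, k < tail.length ∧ j = idx + k ∧ item ∈ tail.getD k [] := by
  intro tail
  induction tail with
  | nil => intro idx item j; simp [idxList]
  | cons s rest ih =>
    intro idx item j
    simp only [idxList, List.mem_append, ih]
    constructor
    · rintro (h | ⟨k, hk, rfl, hm⟩)
      · split at h
        · simp at h; exact ⟨0, by simp, by omega, by simpa [h] using ‹item ∈ s›⟩
        · simp at h
      · exact ⟨k + 1, by simp; omega, by omega, by simpa using hm⟩
    · rintro ⟨k, hk, rfl, hm⟩
      cases k with
      | zero => left; simp at hm; simp [hm]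
      | succ k =>
        right
        exact ⟨k, by simp at hk; omega, by omega, by simpa using hm⟩

theorem idxList_lb : ∀ (tail : List (List Int)) (idx : Nat) (item : Int) (j : Nat),
    j ∈ idxList idx tail item → idx ≤ j := by
  intro tail idx item j hj
  rcases (mem_idxList tail idx item j).mp hj with ⟨k, _, rfl, _⟩
  omega

theorem idxList_sorted :
    ∀ (tail : List (List Int)) (idx : Nat) (item : Int),
      (idxList idx tail item).Pairwise (· < ·) := by
  intro tail
  induction tail with
  | nil => intro idx item; simp [idxList]
  | cons s rest ih =>
    intro idx item
    simp only [idxList]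
    split
    · simp only [List.singleton_append, List.pairwise_cons]
      refine ⟨fun j hj => ?_, ih (idx + 1) item⟩
      have := idxList_lb rest (idx + 1) item j hj
      omega
    · simpa using ih (idx + 1) item

-- sorted access is monotone
theorem sorted_getD_mono (ps : List Nat) (h : ps.Pairwise (· < ·)) (a b : Nat)
    (hab : a ≤ b) (hb : b < ps.length) : ps.getD a 0 ≤ ps.getD b 0 := by
  rcases eq_or_lt_of_le hab with rfl | hlt
  · exact le_refl _
  · have := (List.pairwise_iff_getElem.mp h) a b (by omega) hb hlt
    rw [List.getD_eq_getElem ps 0 (by omega), List.getD_eq_getElem ps 0 hb]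
    omega

theorem lowerBound_spec (ps : List Nat) (x : Nat) (hs : ps.Pairwise (· < ·)) :
    ∀ n lo hi, hi - lo = n → hi ≤ ps.length → lo ≤ hi →
      (∀ k, k < lo → ps.getD k 0 < x) →
      (∀ k, hi ≤ k → k < ps.length → x ≤ ps.getD k 0) →
      (∀ k, k < lowerBound ps x lo hi → ps.getD k 0 < x) ∧
        (lowerBound ps x lo hi < ps.length → x ≤ ps.getD (lowerBound ps x lo hi) 0) ∧
        lowerBound ps x lo hi ≤ hi := by
  intro n
  induction n using Nat.strong_induction_on with
  | _ n ih =>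
    intro lo hi hn hhi hlohi hbelow habove
    by_cases hlt : lo < hi
    · rw [lowerBound, if_pos hlt]
      simp only []
      by_cases hmid : ps.getD ((lo + hi) / 2) 0 < x
      · rw [if_pos hmid]
        exact ih (hi - ((lo + hi) / 2 + 1)) (by omega) ((lo + hi) / 2 + 1) hi rfl hhi
          (by omega)
          (fun k hk => lt_of_le_of_lt
            (sorted_getD_mono ps hs k ((lo + hi) / 2) (by omega) (by omega)) hmid)
          habove
      · rw [if_neg hmid]
        have h1 := ih (((lo + hi) / 2) - lo) (by omega) lo ((lo + hi) / 2) rfl (by omega)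
          (by omega) hbelow
          (fun k hk hklen => le_trans (Nat.le_of_not_lt hmid)
            (sorted_getD_mono ps hs ((lo + hi) / 2) k hk hklen))
        exact ⟨h1.1, h1.2.1, by omega⟩
    · rw [lowerBound, if_neg hlt]
      exact ⟨fun k hk => hbelow k hk, fun hlen => habove _ (by omega) hlen, hlohi⟩

theorem whileA_none (seq : List (List Int)) (item : Int) :
    ∀ n i, seq.length - i = n →
      (∀ j, i ≤ j → j < seq.length → item ∉ seq.getD j []) → whileA seq item i = none := by
  intro n
  induction n using Nat.strong_induction_on with
  | _ n ih =>
    intro i hn hno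
    rw [whileA]
    split
    · rename_i h
      rw [if_neg]
      · exact ih (seq.length - (i + 1)) (by omega) (i + 1) rfl (fun j hj => hno j (by omega))
      · have := hno i (le_refl i) h
        rwa [List.getD_eq_getElem seq [] h] at this
    · rfl

theorem whileA_found (seq : List (List Int)) (item : Int) :
    ∀ n i j, seq.length - i = n → i ≤ j → j < seq.length → item ∈ seq.getD j [] →
      (∀ k, i ≤ k → k < j → item ∉ seq.getD k []) → whileA seq item i = some (j + 1) := by
  intro n
  induction n using Nat.strong_induction_on with
  | _ n ih =>
    intro i j hn hij hjlen hmem hmin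
    rw [whileA]
    rw [dif_pos (by omega)]
    rcases eq_or_lt_of_le hij with rfl | hlt
    · rw [if_pos]
      rwa [List.getD_eq_getElem seq [] hjlen] at hmem
    · rw [if_neg]
      · exact ih (seq.length - (i + 1)) (by omega) (i + 1) j rfl (by omega) hjlen hmem
          (fun k hk => hmin k (by omega))
      · have := hmin i (le_refl i) hlt
        rwa [List.getD_eq_getElem seq [] (by omega)] at this

-- the per-prefix-item correspondence: B's index lookup + binary search = A's while loop
theorem item_step (seq : List (List Int)) (item : Int) (nxt : Nat) :
    (match (idxList 0 seq item).getLast? with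
     | none => (none : Option Nat)
     | some last =>
       if last < nxt then none
       else some ((idxList 0 seq item).getD
         (lowerBound (idxList 0 seq item) nxt 0 (idxList 0 seq item).length) 0 + 1))
    = whileA seq item nxt := by
  have hsort := idxList_sorted seq 0 item
  have hmem : ∀ j, j ∈ idxList 0 seq item ↔ j < seq.length ∧ item ∈ seq.getD j [] := by
    intro j
    rw [mem_idxList]
    constructor
    · rintro ⟨k, hk, rfl, hm⟩
      exact ⟨by omega, by simpa using hm⟩
    · rintro ⟨hj, hm⟩
      exact ⟨j, hj, by omega, hm⟩
  cases hl : (idxList 0 seq item).getLast? with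
  | none =>
    have hnil : idxList 0 seq item = [] := List.getLast?_eq_none_iff.mp hl
    simp only []
    symm
    apply whileA_none seq item _ nxt rfl
    intro j hj hjlen hm
    have : j ∈ idxList 0 seq item := (hmem j).mpr ⟨hjlen, hm⟩
    simp [hnil] at this
  | some last =>
    have hlastmem : last ∈ idxList 0 seq item := List.mem_of_getLast? hl
    have hnnil : idxList 0 seq item ≠ [] := List.ne_nil_of_mem hlastmem
    have hpos : 0 < (idxList 0 seq item).length := List.length_pos_iff.mpr hnnil
    have hlastval : last = (idxList 0 seq item).getD ((idxList 0 seq item).length - 1) 0 := by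
      have h2 := hl
      rw [List.getLast?_eq_getElem?] at h2
      rw [List.getD_eq_getElem _ 0 (by omega)]
      rw [List.getElem?_eq_getElem (by omega)] at h2
      exact (Option.some_inj.mp h2).symm
    have hmax : ∀ j ∈ idxList 0 seq item, j ≤ last := by
      intro j hj
      obtain ⟨m, hmlen, rfl⟩ := List.mem_iff_getElem.mp hj
      rw [hlastval, ← List.getD_eq_getElem _ 0 hmlen]
      exact sorted_getD_mono _ hsort m _ (by omega) (by omega)
    simp only []
    by_cases hcmp : last < nxt
    · rw [if_pos hcmp]
      symm
      apply whileA_none seq item _ nxt rfl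
      intro j hj hjlen hm
      have hjps := (hmem j).mpr ⟨hjlen, hm⟩
      have := hmax j hjps
      omega
    · rw [if_neg hcmp]
      obtain ⟨hbel, habv, hle⟩ := lowerBound_spec (idxList 0 seq item) nxt hsort
        ((idxList 0 seq item).length - 0) 0 (idxList 0 seq item).length rfl (le_refl _)
        (by omega) (fun k hk => by omega) (fun k hk hk2 => by omega)
      set lo := lowerBound (idxList 0 seq item) nxt 0 (idxList 0 seq item).length with hlo
      have hlolen : lo < (idxList 0 seq item).length := by
        rcases eq_or_lt_of_le hle with heq | h
        · exfalso
          have := hbel ((idxList 0 seq item).length - 1) (by omega)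
          rw [← hlastval] at this
          omega
        · exact h
      have hnle := habv hlolen
      have hjmem : (idxList 0 seq item).getD lo 0 ∈ idxList 0 seq item := by
        rw [List.getD_eq_getElem _ 0 hlolen]
        exact List.getElem_mem _
      obtain ⟨hjlen, hjitem⟩ := (hmem _).mp hjmem
      symm
      apply whileA_found seq item (seq.length - nxt) nxt _ rfl hnle hjlen hjitem
      intro k hk hkj hkm
      have hkps := (hmem k).mpr ⟨by omega, hkm⟩
      obtain ⟨m, hmlen, hmk⟩ := List.mem_iff_getElem.mp hkps
      rcases lt_or_ge m lo with h | h
      · have := hbel m h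
        rw [List.getD_eq_getElem _ 0 hmlen, hmk] at this
        omega
      · have := sorted_getD_mono _ hsort lo m h hmlen
        rw [List.getD_eq_getElem _ 0 hmlen, hmk] at this
        omega

theorem matchB_loopA (seq : List (List Int)) :
    ∀ (prefix_ : List Int) (nxt : Nat),
      matchB (buildPos 0 PySem.Dict.empty seq) prefix_ nxt = loopA seq prefix_ nxt := by
  intro prefix_
  induction prefix_ with
  | nil => intro nxt; rfl
  | cons item rest ih =>
    intro nxt
    have hstep := item_step seq item nxt
    simp only [matchB, loopA, buildPos_spec seq item]
    cases hgl : (idxList 0 seq item).getLast? with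
    | none =>
      rw [hgl] at hstep
      dsimp only at hstep ⊢
      rw [← hstep]
    | some last =>
      rw [hgl] at hstep
      dsimp only at hstep ⊢
      by_cases hcmp : last < nxt
      · rw [if_pos hcmp] at hstep ⊢
        rw [← hstep]
      · rw [if_neg hcmp] at hstep ⊢
        rw [← hstep]
        exact ih _

theorem step_eq (prefix_ : List Int) (acc : List (List (List Int))) (seq : List (List Int)) :
    stepA prefix_ acc seq = stepB prefix_ acc seq := by
  unfold stepA stepB
  rw [matchB_loopA]

theorem foldl_eq (prefix_ : List Int) (sequences : List (List (List Int)))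
    (acc : List (List (List Int))) :
    sequences.foldl (stepA prefix_) acc = sequences.foldl (stepB prefix_) acc := by
  induction sequences generalizing acc with
  | nil => rfl
  | cons s ss ih => simp [List.foldl, step_eq, ih]

-- ===== VERDICT (by name: the statement is the Claim_ definition above) =====
theorem project_database_py_spec : Claim_equal_project_database_py := by
  intro sequences prefix_ _
  unfold Spec_project_database_py project_database_py project_database_py_alt
  exact foldl_eq prefix_ sequences []
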